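-- pv_equiv track=rewrite | github.com/yixin0829/push-to-talk | src/gui/hotkey_recorder.py | _format_hotkey_string
-- ===== SOURCE A (Python) =====
-- from typing import Callable, Optional, Set
--
-- MODIFIER_ORDER = ["ctrl", "alt", "shift", "cmd"]
--
-- SHIFT_NUMBER_TO_SYMBOL = {
--     "1": "!",
--     "2": "@",
--     "3": "#",
--     "4": "$",
--     "5": "%",
--     "6": "^",
--     "7": "&",
--     "8": "*",
--     "9": "(",
--     "0": ")",
-- }
--
-- def _format_hotkey_string(keys: Set[str]) -> str:
--     """Format keys as hotkey string with modifiers first.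
--
--     Args:
--         keys: Set of normalized key names
--
--     Returns:
--         Hotkey string like "ctrl+shift+^"
--     """
--     if not keys:
--         return ""
--
--     # Work with a mutable copy
--     keys = set(keys)
--
--     # Convert Shift+number to symbol (e.g., shift+6 -> ^)
--     if "shift" in keys:
--         for number, symbol in SHIFT_NUMBER_TO_SYMBOL.items():
--             if number in keys:
--                 keys.discard(number)
--                 keys.add(symbol)
--
--     modifiers = []
--     regular_keys = []
--
--     for key in keys:
--         if key in MODIFIER_ORDER:
--             modifiers.append(key)
--         else:
--             regular_keys.append(key)
--
--     # Sort modifiers by predefined order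
--     modifiers.sort(key=lambda k: MODIFIER_ORDER.index(k))
--
--     # Sort regular keys alphabetically
--     regular_keys.sort()
--
--     return "+".join(modifiers + regular_keys)
-- ===== SOURCE B (Python) =====
-- MODIFIER_ORDER = ["ctrl", "alt", "shift", "cmd"]
--
-- SHIFT_NUMBER_TO_SYMBOL = {
--     "1": "!", "2": "@", "3": "#", "4": "$", "5": "%",
--     "6": "^", "7": "&", "8": "*", "9": "(", "0": ")",
-- }
--
--
-- def _format_hotkey_string(keys):
--     # One composite-key sort instead of partition + two sorts: every key gets
--     # the rank (position-in-MODIFIER_ORDER, "") if it is a modifier, else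
--     # (len(MODIFIER_ORDER), key), so a single sorted() yields modifiers in
--     # canonical order followed by the remaining keys alphabetically.
--     shift = "shift" in keys
--     canon = (lambda k: SHIFT_NUMBER_TO_SYMBOL.get(k, k)) if shift else (lambda k: k)
--
--     def rank(k):
--         if k in MODIFIER_ORDER:
--             return (MODIFIER_ORDER.index(k), "")
--         return (len(MODIFIER_ORDER), k)
--
--     return "+".join(sorted({canon(k) for k in keys}, key=rank))
-- ===== Notes on version B (the rewrite author's own statement) =====
-- stated objective: simpler
-- what changed: Replaces A's empty guard, set-mutating digit loop and partition-into-two-lists-plus-two-sorts with a single sorted() over the canonicalised set under one composite key (modifier-rank, name), so there is no partition, no modifier sort and no concatenation of two sorted lists.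
import Mathlib
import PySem

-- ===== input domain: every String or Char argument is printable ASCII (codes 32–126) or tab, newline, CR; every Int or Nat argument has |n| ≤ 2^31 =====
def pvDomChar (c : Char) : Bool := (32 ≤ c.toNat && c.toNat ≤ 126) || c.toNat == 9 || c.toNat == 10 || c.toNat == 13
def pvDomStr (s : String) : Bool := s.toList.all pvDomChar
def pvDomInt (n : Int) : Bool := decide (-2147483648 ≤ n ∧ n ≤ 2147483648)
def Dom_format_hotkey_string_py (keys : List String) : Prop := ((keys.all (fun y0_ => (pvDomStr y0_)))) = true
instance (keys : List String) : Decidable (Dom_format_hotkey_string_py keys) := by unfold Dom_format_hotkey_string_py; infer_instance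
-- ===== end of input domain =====

-- B replaces A's empty guard, set-mutating digit loop and partition-plus-two-sorts
-- by one composite-key sort (rank = (modifier position, name)) of the canonicalised
-- set (objective: simpler). Equivalence is about the return value.

-- ===== PORT A =====
def pvModifierOrder : List String := ["ctrl", "alt", "shift", "cmd"]

def pvShiftPairs : List (String × String) :=
  [("1", "!"), ("2", "@"), ("3", "#"), ("4", "$"), ("5", "%"),
   ("6", "^"), ("7", "&"), ("8", "*"), ("9", "("), ("0", ")")]

def format_hotkey_string_py (keys : List String) : String :=
  -- if not keys: return ""
  if keys.isEmpty then ""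
  else
    -- keys = set(keys)
    let s : PySem.Set String := PySem.Set.ofList keys
    -- if "shift" in keys: for number, symbol in SHIFT_NUMBER_TO_SYMBOL.items(): …
    let s2 : PySem.Set String :=
      if PySem.Set.contains s "shift" then
        pvShiftPairs.foldl (fun acc p =>
          if PySem.Set.contains acc p.1 then
            PySem.Set.add (PySem.Set.discard acc p.1) p.2
          else acc) s
      else s
    -- for key in keys: append to modifiers / regular_keys
    let pr := s2.foldl (fun (mr : List String × List String) key =>
        if pvModifierOrder.contains key then (mr.1 ++ [key], mr.2)
        else (mr.1, mr.2 ++ [key])) ([], [])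
    -- modifiers.sort(key=lambda k: MODIFIER_ORDER.index(k))  (index always exists here)
    let modifiers := PySem.List.sorted pr.1 (fun k => (PySem.List.index? pvModifierOrder k).getD 0)
    -- regular_keys.sort()
    let regular := PySem.List.sorted pr.2 (fun k => k)
    PySem.Str.join "+" (modifiers ++ regular)

-- ===== PORT B =====
def pvShiftDict : PySem.Dict String String := PySem.Dict.ofList pvShiftPairs

-- rank(k) = (pvK1 k, pvK2 k): modifiers get (position, ""), others (len(MODIFIER_ORDER), k)
def pvK1 (k : String) : Nat :=
  if pvModifierOrder.contains k then (PySem.List.index? pvModifierOrder k).getD 0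
  else pvModifierOrder.length

def pvK2 (k : String) : String := if pvModifierOrder.contains k then "" else k

def format_hotkey_string_py_alt (keys : List String) : String :=
  let s : PySem.Set String := PySem.Set.ofList keys
  -- shift = "shift" in keys
  let shift := PySem.Set.contains s "shift"
  -- canon = SHIFT_NUMBER_TO_SYMBOL.get(k, k) if shift else identity
  let canon : String → String := fun k => if shift then pvShiftDict.getD k k else k
  -- {canon(k) for k in keys}
  let s2 : PySem.Set String := s.foldl (fun t k => PySem.Set.add t (canon k)) PySem.Set.empty
  -- "+".join(sorted(s2, key=rank))  — one sort under the composite key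
  PySem.Str.join "+" (PySem.List.sorted2 s2 pvK1 pvK2)

-- ===== PRECONDITION & SPEC =====
def Spec_format_hotkey_string_py (keys : List String) (out : String) : Prop := out = format_hotkey_string_py_alt keys
instance (keys : List String) (out : String) : Decidable (Spec_format_hotkey_string_py keys out) := by unfold Spec_format_hotkey_string_py; infer_instance

-- ===== CLAIM (what is proved, stated in full; the proofs are below) =====
def Claim_equal_format_hotkey_string_py : Prop := ∀ (keys : List String), Dom_format_hotkey_string_py keys → Spec_format_hotkey_string_py keys (format_hotkey_string_py keys)

-- ===== LEMMAS AND PROOFS =====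

theorem partition_foldl (l : List String) :
    l.foldl (fun (mr : List String × List String) key =>
        if pvModifierOrder.contains key then (mr.1 ++ [key], mr.2)
        else (mr.1, mr.2 ++ [key])) ([], [])
      = (l.filter (fun k => pvModifierOrder.contains k),
         l.filter (fun k => !(pvModifierOrder.contains k))) := by
  rw [PySem.List.foldl_congr_mem l _
    (fun (mr : List String × List String) key =>
      ((if pvModifierOrder.contains key then mr.1 ++ [key] else mr.1),
       (if !(pvModifierOrder.contains key) then mr.2 ++ [key] else mr.2)))
    ([], [])
    (by intro mr key _
        by_cases h : key ∈ pvModifierOrder <;> simp [h])]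
  rw [PySem.List.foldl_prod_mk
    (f := fun acc k => if pvModifierOrder.contains k then acc ++ [k] else acc)
    (g := fun acc k => if !(pvModifierOrder.contains k) then acc ++ [k] else acc)]
  rw [PySem.List.foldl_append_if_eq_filter, PySem.List.foldl_append_if_eq_filter]
  simp only [List.nil_append]

theorem conv_nodup (P : List (String × String)) (s : PySem.Set String) (hs : s.Nodup) :
    (P.foldl (fun acc p =>
        if PySem.Set.contains acc p.1 then
          PySem.Set.add (PySem.Set.discard acc p.1) p.2
        else acc) s).Nodup := by
  induction P generalizing s with
  | nil => exact hs
  | cons p rest ih =>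
    simp only [List.foldl_cons]
    apply ih
    split
    · exact PySem.Set.nodup_add _ _ (PySem.Set.nodup_discard _ _ hs)
    · exact hs

theorem conv_mem (P : List (String × String)) (s : PySem.Set String)
    (hnd : (P.map Prod.fst).Nodup)
    (hkv : ∀ p ∈ P, ∀ q ∈ P, p.1 ≠ q.2) (x : String) :
    x ∈ P.foldl (fun acc p =>
        if PySem.Set.contains acc p.1 then
          PySem.Set.add (PySem.Set.discard acc p.1) p.2
        else acc) s
      ↔ (x ∈ s ∧ x ∉ P.map Prod.fst) ∨ ∃ p ∈ P, p.1 ∈ s ∧ x = p.2 := by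
  induction P generalizing s with
  | nil => simp
  | cons p rest ih =>
    simp only [List.foldl_cons]
    have hnd' : (rest.map Prod.fst).Nodup := (List.nodup_cons.mp hnd).2
    have hp_rest : p.1 ∉ rest.map Prod.fst := (List.nodup_cons.mp hnd).1
    have hkv' : ∀ a ∈ rest, ∀ b ∈ rest, a.1 ≠ b.2 := fun a ha b hb =>
      hkv a (List.mem_cons_of_mem _ ha) b (List.mem_cons_of_mem _ hb)
    rw [ih _ hnd' hkv']
    set s' := if PySem.Set.contains s p.1 = true then
        PySem.Set.add (PySem.Set.discard s p.1) p.2 else s with hs'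
    have hmem : ∀ y, y ∈ s' ↔ (y ∈ s ∧ y ≠ p.1) ∨ (p.1 ∈ s ∧ y = p.2) := by
      intro y
      by_cases h : PySem.Set.contains s p.1 = true
      · have hps : p.1 ∈ s := (PySem.Set.contains_iff _ _).mp h
        simp [hs', PySem.Set.mem_add, PySem.Set.mem_discard, hps]
      · have hps : p.1 ∉ s := fun hm => h ((PySem.Set.contains_iff _ _).mpr hm)
        simp [hs', hps]
        intro hy
        exact fun he => absurd (he ▸ hy) hps
    have hkey : ∀ q ∈ rest, (q.1 ∈ s' ↔ q.1 ∈ s) := by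
      intro q hq
      have h1 : q.1 ≠ p.1 := by
        intro he
        exact hp_rest (he ▸ (List.mem_map_of_mem (f := Prod.fst) hq))
      have h2 : q.1 ≠ p.2 := hkv q (List.mem_cons_of_mem _ hq) p (List.mem_cons_self)
      rw [hmem q.1]
      constructor
      · rintro (⟨h, _⟩ | ⟨_, h⟩)
        · exact h
        · exact absurd h h2
      · intro h; exact Or.inl ⟨h, h1⟩
    constructor
    · rintro (⟨hx, hnx⟩ | ⟨q, hq, hqs, rfl⟩)
      · rw [hmem x] at hx
        rcases hx with ⟨hxs, hne⟩ | ⟨hps, rfl⟩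
        · exact Or.inl ⟨hxs, by simp [hne, hnx]⟩
        · exact Or.inr ⟨p, List.mem_cons_self, hps, rfl⟩
      · exact Or.inr ⟨q, List.mem_cons_of_mem _ hq, (hkey q hq).mp hqs, rfl⟩
    · rintro (⟨hx, hnx⟩ | ⟨q, hq, hqs, rfl⟩)
      · simp only [List.map_cons, List.mem_cons] at hnx
        push Not at hnx
        refine Or.inl ⟨?_, by simpa using hnx.2⟩
        rw [hmem x]; exact Or.inl ⟨hx, hnx.1⟩
      · rcases List.mem_cons.mp hq with rfl | hq'
        · refine Or.inl ⟨by rw [hmem q.2]; exact Or.inr ⟨hqs, rfl⟩, ?_⟩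
          intro hm
          rcases List.mem_map.mp hm with ⟨r, hr, hre⟩
          exact hkv r (List.mem_cons_of_mem _ hr) q hq hre
        · exact Or.inr ⟨q, hq', (hkey q hq').mpr hqs, rfl⟩

theorem dict_getD_of_mem {p : String × String} (hp : p ∈ pvShiftPairs) :
    pvShiftDict.getD p.1 p.1 = p.2 := by
  fin_cases hp <;> rfl

theorem dict_getD_of_not_mem {k : String} (hk : k ∉ pvShiftPairs.map Prod.fst) :
    pvShiftDict.getD k k = k := by
  simp only [pvShiftPairs, List.map_cons, List.map_nil, List.mem_cons, not_or] at hk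
  obtain ⟨h1,h2,h3,h4,h5,h6,h7,h8,h9,h10,-⟩ := hk
  have hd : pvShiftDict = PySem.Dict.mk pvShiftPairs := by decide
  have g1 := Ne.symm h1; have g2 := Ne.symm h2; have g3 := Ne.symm h3
  have g4 := Ne.symm h4; have g5 := Ne.symm h5; have g6 := Ne.symm h6
  have g7 := Ne.symm h7; have g8 := Ne.symm h8; have g9 := Ne.symm h9
  have g10 := Ne.symm h10
  simp [hd, pvShiftPairs, PySem.Dict.getD_eq_get?_getD,    g1,g2,g3,g4,g5,g6,g7,g8,g9,g10, PySem.Dict.get?]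

theorem conv_agree (s : PySem.Set String) (x : String) :
    (x ∈ pvShiftPairs.foldl (fun acc p =>
        if PySem.Set.contains acc p.1 then
          PySem.Set.add (PySem.Set.discard acc p.1) p.2
        else acc) s)
      ↔ x ∈ s.foldl (fun t k => PySem.Set.add t (pvShiftDict.getD k k)) PySem.Set.empty := by
  rw [conv_mem _ _ (by decide) (by decide) x,
      ← PySem.Set.update_map_eq_foldl_add]
  rw [PySem.Set.mem_update]
  simp only [PySem.Set.empty, List.not_mem_nil, false_or]
  constructor
  · rintro (⟨hx, hnx⟩ | ⟨p, hp, hps, rfl⟩)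
    · exact List.mem_map.mpr ⟨x, hx, dict_getD_of_not_mem hnx⟩
    · exact List.mem_map.mpr ⟨p.1, hps, dict_getD_of_mem hp⟩
  · intro hm
    rcases List.mem_map.mp hm with ⟨k, hk, rfl⟩
    by_cases hkm : k ∈ pvShiftPairs.map Prod.fst
    · rcases List.mem_map.mp hkm with ⟨p, hp, rfl⟩
      rw [dict_getD_of_mem hp]
      exact Or.inr ⟨p, hp, hk, rfl⟩
    · rw [dict_getD_of_not_mem hkm]
      exact Or.inl ⟨hk, hkm⟩

theorem modifiers_sorted (t : PySem.Set String) (ht : t.Nodup) :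
    PySem.List.sorted (t.filter (fun k => pvModifierOrder.contains k))
        (fun k => (PySem.List.index? pvModifierOrder k).getD 0)
      = pvModifierOrder.filter (fun m => PySem.Set.contains t m) := by
  apply PySem.List.sorted_eq_of_perm_of_pairwise_lt
  · refine (List.perm_ext_iff_of_nodup
      ((by decide : pvModifierOrder.Nodup).filter _) (ht.filter _)).mpr ?_
    intro a
    simp only [List.mem_filter]
    constructor
    · rintro ⟨h1, h2⟩; exact ⟨by simpa using h2, by simpa using h1⟩
    · rintro ⟨h1, h2⟩; exact ⟨by simpa using h2, by simpa using h1⟩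
  · have hMO : pvModifierOrder.Pairwise (fun a b =>
        (PySem.List.index? pvModifierOrder a).getD 0 <
        (PySem.List.index? pvModifierOrder b).getD 0) := by decide
    exact hMO.sublist List.filter_sublist

-- Two Nodup lists with the same members sort (id key) to the same list.
theorem sorted_congr_mem (xs ys : List String) (hx : xs.Nodup) (hy : ys.Nodup)
    (h : ∀ a, a ∈ xs ↔ a ∈ ys) :
    PySem.List.sorted xs (fun k => k) = PySem.List.sorted ys (fun k => k) := by
  rw [PySem.List.sorted_id_eq_sorted_id_iff_perm]
  exact (List.perm_ext_iff_of_nodup hx hy).mpr h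

-- sorted2 with a (Nat, String) key pair is sorted under the lexicographic key.
theorem sorted2_eq_sorted_lex (xs : List String) (k1 : String → Nat) (k2 : String → String) :
    PySem.List.sorted2 xs k1 k2 = PySem.List.sorted xs (fun x => toLex (k1 x, k2 x)) := by
  rw [PySem.List.sorted_eq_foldl_insertBy]
  unfold PySem.List.sorted2
  simp only [Bool.false_eq_true, if_false]
  congr 1
  funext acc x
  congr 1
  funext a b
  rw [Bool.eq_iff_iff]
  simp only [Bool.or_eq_true, Bool.and_eq_true, Bool.not_eq_true',
    decide_eq_true_eq, decide_eq_false_iff_not, Prod.Lex.lt_iff, ofLex_toLex]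
  constructor
  · rintro (h | ⟨h1, h2⟩)
    · exact Or.inl h
    · rcases Nat.lt_trichotomy (k1 a) (k1 b) with h | h | h
      · exact Or.inl h
      · exact Or.inr ⟨h, h2⟩
      · exact absurd h h1
  · rintro (h | ⟨h1, h2⟩)
    · exact Or.inl h
    · exact Or.inr ⟨by omega, h2⟩

-- The composite-key sort of a duplicate-free list IS "modifiers in canonical
-- order, then the remaining keys alphabetically".
theorem sorted2_char (t : PySem.Set String) (ht : t.Nodup) :
    PySem.List.sorted2 t pvK1 pvK2
      = pvModifierOrder.filter (fun m => PySem.Set.contains t m)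
        ++ PySem.List.sorted (t.filter (fun k => !(pvModifierOrder.contains k))) (fun k => k) := by
  rw [sorted2_eq_sorted_lex]
  apply PySem.List.sorted_eq_of_perm_of_pairwise_lt
  · have h1 : (pvModifierOrder.filter (fun m => PySem.Set.contains t m)).Perm
        (t.filter (fun k => pvModifierOrder.contains k)) := by
      refine (List.perm_ext_iff_of_nodup
        ((by decide : pvModifierOrder.Nodup).filter _) (ht.filter _)).mpr ?_
      intro a
      simp only [List.mem_filter]
      constructor
      · rintro ⟨ha, hb⟩; exact ⟨by simpa using hb, by simpa using ha⟩
      · rintro ⟨ha, hb⟩; exact ⟨by simpa using hb, by simpa using ha⟩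
    have h2 : (PySem.List.sorted (t.filter (fun k => !(pvModifierOrder.contains k)))
        (fun k => k)).Perm (t.filter (fun k => !(pvModifierOrder.contains k))) :=
      PySem.List.sorted_perm _ _ _
    exact (h1.append h2).trans (List.filter_append_perm _ t)
  · rw [List.pairwise_append]
    refine ⟨?_, ?_, ?_⟩
    · have hMO : pvModifierOrder.Pairwise (fun a b => pvK1 a < pvK1 b) := by decide
      exact (hMO.sublist List.filter_sublist).imp
        (fun h => Prod.Lex.lt_iff.mpr (Or.inl h))
    · have hle := PySem.List.sorted_pairwise
        (t.filter (fun k => !(pvModifierOrder.contains k))) (fun k : String => k)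
      have hnd : (PySem.List.sorted (t.filter (fun k => !(pvModifierOrder.contains k)))
          (fun k => k)).Nodup :=
        ((PySem.List.sorted_perm _ _ _).nodup_iff).mpr (ht.filter _)
      refine (hle.and hnd).imp_of_mem ?_
      intro a b ha hb h
      have hna : a ∉ pvModifierOrder := by
        have := (List.mem_filter.mp ((PySem.List.mem_sorted _ _ _ _).mp ha)).2
        simpa using this
      have hnb : b ∉ pvModifierOrder := by
        have := (List.mem_filter.mp ((PySem.List.mem_sorted _ _ _ _).mp hb)).2
        simpa using this
      refine Prod.Lex.lt_iff.mpr (Or.inr ⟨?_, ?_⟩)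
      · simp [pvK1, hna, hnb]
      · simpa [pvK2, hna, hnb] using lt_of_le_of_ne h.1 h.2
    · intro m hm r hr
      have hmm : m ∈ pvModifierOrder := (List.mem_filter.mp hm).1
      have hnr : r ∉ pvModifierOrder := by
        have := (List.mem_filter.mp ((PySem.List.mem_sorted _ _ _ _).mp hr)).2
        simpa using this
      refine Prod.Lex.lt_iff.mpr (Or.inl ?_)
      have h4 : pvK1 m < pvModifierOrder.length := by
        fin_cases hmm <;> decide
      simpa [pvK1, hnr] using h4

-- Common assembly: A's two sorted pieces over tA equal B's one composite sort
-- over tB, whenever tA and tB are duplicate-free with the same members.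
theorem join_pieces (tA tB : PySem.Set String) (hA : tA.Nodup) (hB : tB.Nodup)
    (hm : ∀ x, x ∈ tA ↔ x ∈ tB) :
    PySem.List.sorted (tA.filter (fun k => pvModifierOrder.contains k))
        (fun k => (PySem.List.index? pvModifierOrder k).getD 0)
      ++ PySem.List.sorted (tA.filter (fun k => !(pvModifierOrder.contains k))) (fun k => k)
      = PySem.List.sorted2 tB pvK1 pvK2 := by
  rw [sorted2_char tB hB, modifiers_sorted tA hA]
  congr 1
  · refine List.filter_congr (fun m _ => ?_)
    rw [Bool.eq_iff_iff, PySem.Set.contains_iff, PySem.Set.contains_iff]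
    exact hm m
  · refine sorted_congr_mem _ _ (hA.filter _) (hB.filter _) (fun a => ?_)
    simp only [List.mem_filter]
    exact and_congr_left' (hm a)

-- ===== VERDICT (by name: the statement is the Claim_ definition above) =====
theorem format_hotkey_string_py_spec : Claim_equal_format_hotkey_string_py := by
  intro keys _
  show format_hotkey_string_py keys = format_hotkey_string_py_alt keys
  by_cases hk : keys.isEmpty
  · rw [List.isEmpty_iff.mp hk]; rfl
  · unfold format_hotkey_string_py
    simp only [format_hotkey_string_py_alt]
    rw [if_neg (by simp [hk])]
    have hs : (PySem.Set.ofList keys).Nodup := PySem.Set.nodup_ofList keys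
    by_cases hsh : PySem.Set.contains (PySem.Set.ofList keys) "shift" = true
    · simp only [partition_foldl, hsh, if_true]
      refine congrArg (PySem.Str.join "+") (join_pieces _ _ ?_ ?_ ?_)
      · exact conv_nodup pvShiftPairs (PySem.Set.ofList keys) hs
      · rw [← PySem.Set.update_map_eq_foldl_add]
        exact PySem.Set.nodup_update _ _ (by decide)
      · exact conv_agree (PySem.Set.ofList keys)
    · have hsh' : PySem.Set.contains (PySem.Set.ofList keys) "shift" = false := by
        simpa using hsh
      rw [if_neg hsh]
      simp only [partition_foldl, hsh', Bool.false_eq_true, if_false]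
      refine congrArg (PySem.Str.join "+") (join_pieces _ _ hs ?_ ?_)
      · rw [← PySem.Set.update_map_eq_foldl_add]
        exact PySem.Set.nodup_update _ _ (by decide)
      · intro x
        rw [← PySem.Set.update_map_eq_foldl_add, PySem.Set.mem_update]
        simp [PySem.Set.empty]
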